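-- pv_equiv track=rewrite | github.com/hong-sh/coding_test_practice | this_is_coding_test/binary_search/binary_search07.py | exist_nums
-- ===== SOURCE A (Python) =====
-- def exist_nums(nums:list, finds:list):
--     nums.sort()
--
--     exist = []
--     for find in finds:
--         left , right = 0, len(nums)-1
--         while True:
--             if left > right:
--                 exist.append(0)
--                 break
--
--             mid = (left + right) // 2
--             if nums[mid] == find:
--                 exist.append(1)
--                 break
--
--             if nums[mid] < find:
--                 left = mid + 1
--
--             if nums[mid] > find:
--                 right = mid - 1
--
--     return exist
-- ===== SOURCE B (Python) =====
-- def exist_nums(nums: list, finds: list):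
--     nums.sort()
--     present = set(nums)
--     return [1 if find in present else 0 for find in finds]
-- ===== Notes on version B (the rewrite author's own statement) =====
-- stated objective: faster
-- what changed: Replaces the per-query hand-written binary search over the sorted list with a hash set built once and O(1) membership tests per query (nums.sort() kept for the caller-visible mutation).
import Mathlib
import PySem

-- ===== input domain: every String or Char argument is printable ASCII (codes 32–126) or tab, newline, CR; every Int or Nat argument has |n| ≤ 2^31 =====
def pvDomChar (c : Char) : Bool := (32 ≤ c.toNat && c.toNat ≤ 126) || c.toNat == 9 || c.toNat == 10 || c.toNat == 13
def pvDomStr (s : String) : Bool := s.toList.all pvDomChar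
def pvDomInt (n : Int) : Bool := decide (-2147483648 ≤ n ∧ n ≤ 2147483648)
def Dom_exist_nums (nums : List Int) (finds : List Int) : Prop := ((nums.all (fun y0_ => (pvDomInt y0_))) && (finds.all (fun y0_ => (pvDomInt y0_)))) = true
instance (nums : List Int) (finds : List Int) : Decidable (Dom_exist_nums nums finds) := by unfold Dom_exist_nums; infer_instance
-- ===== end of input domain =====

-- B replaces A's per-query binary search by a set built once with O(1) membership; both mutate nums via sort() — equivalence here is about the return value.


-- ===== PORT A =====
-- the 'while True' loop of A, on the (already sorted) list, for one find
def bsLoop (xs : List Int) (find : Int) (left right : Int) : Int :=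
  if left > right then 0
  else
    match PySem.List.pyGet? xs (PySem.Int.floordiv (left + right) 2) with
    | none => 0   -- unreachable under A's invariant (mid always in range)
    | some v =>
      if v = find then 1
      else if v < find then bsLoop xs find (PySem.Int.floordiv (left + right) 2 + 1) right
      else bsLoop xs find left (PySem.Int.floordiv (left + right) 2 - 1)
termination_by (right + 1 - left).toNat
decreasing_by
  · have hm := PySem.Int.floordiv_two_mid_bounds (lo := left) (hi := right) (by omega)
    omega
  · have hm := PySem.Int.floordiv_two_mid_bounds (lo := left) (hi := right) (by omega)
    omega

def exist_nums (nums : List Int) (finds : List Int) : List Int :=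
  let sortedNums := PySem.List.sorted nums (fun x => x) false
  finds.map (fun find => bsLoop sortedNums find 0 ((sortedNums.length : Int) - 1))

-- ===== PORT B =====
def exist_nums_alt (nums : List Int) (finds : List Int) : List Int :=
  let sortedNums := PySem.List.sorted nums (fun x => x) false
  let present : PySem.Set Int := PySem.Set.ofList sortedNums
  finds.map (fun find => if PySem.Set.contains present find then 1 else 0)

-- ===== PRECONDITION & SPEC =====
def Spec_exist_nums (nums : List Int) (finds : List Int) (out : List Int) : Prop := out = exist_nums_alt nums finds
instance (nums : List Int) (finds : List Int) (out : List Int) : Decidable (Spec_exist_nums nums finds out) := by unfold Spec_exist_nums; infer_instance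

-- ===== CLAIM (what is proved, stated in full; the proofs are below) =====
def Claim_equal_exist_nums : Prop := ∀ (nums : List Int) (finds : List Int), Dom_exist_nums nums finds → Spec_exist_nums nums finds (exist_nums nums finds)

-- ===== LEMMAS AND PROOFS =====

-- Binary-search correctness on a sorted list, with the standard bracketing invariant.
lemma bsLoop_correct (xs : List Int) (find : Int) :
    ∀ (n : Nat) (left right : Int),
      xs.Pairwise (· ≤ ·) →
      0 ≤ left → right < (xs.length : Int) →
      (right + 1 - left).toNat ≤ n →
      (∀ (i : Nat) (hi : i < xs.length), (i : Int) < left → xs[i] < find) →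
      (∀ (i : Nat) (hi : i < xs.length), right < (i : Int) → find < xs[i]) →
      bsLoop xs find left right = if find ∈ xs then 1 else 0 := by
  intro n
  induction n with
  | zero =>
    intro left right _ hl hr hn hlo hhi
    have hgt : left > right := by omega
    rw [bsLoop, if_pos hgt]
    have : find ∉ xs := by
      intro hmem
      obtain ⟨i, hi, hx⟩ := List.mem_iff_getElem.mp hmem
      rcases lt_or_ge (i : Int) left with h | h
      · exact absurd hx (by have := hlo i hi h; omega)
      · exact absurd hx (by have := hhi i hi (by omega); omega)
    simp [this]
  | succ n ih =>
    intro left right hs hl hr hn hlo hhi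
    by_cases hgt : left > right
    · rw [bsLoop, if_pos hgt]
      have : find ∉ xs := by
        intro hmem
        obtain ⟨i, hi, hx⟩ := List.mem_iff_getElem.mp hmem
        rcases lt_or_ge (i : Int) left with h | h
        · exact absurd hx (by have := hlo i hi h; omega)
        · exact absurd hx (by have := hhi i hi (by omega); omega)
      simp [this]
    · have hle : left ≤ right := by omega
      have hm := PySem.Int.floordiv_two_mid_bounds (lo := left) (hi := right) hle
      set mid := PySem.Int.floordiv (left + right) 2 with hmid
      have h0 : 0 ≤ mid := by omega
      have h1 : mid < (xs.length : Int) := by omega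
      have hget : PySem.List.pyGet? xs mid = some (xs[mid.toNat]'(by omega)) :=
        PySem.List.pyGet?_eq_some_getElem (i := mid) xs h0 h1
      rw [bsLoop, if_neg hgt, ← hmid, hget]
      simp only
      by_cases hveq : xs[mid.toNat]'(by omega) = find
      · have : find ∈ xs := hveq ▸ List.getElem_mem _
        simp [hveq, this]
      · rw [if_neg hveq]
        have hmono : ∀ (p q : Nat) (hq : q < xs.length) (hpq : p ≤ q), xs[p]'(by omega) ≤ xs[q] := by
          intro p q hq hpq
          rcases eq_or_lt_of_le hpq with rfl | hlt
          · exact le_refl _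
          · exact List.Pairwise.rel_get_of_lt (by simpa [List.get_eq_getElem] using hs)
              (by simpa using hlt)
        by_cases hvlt : xs[mid.toNat]'(by omega) < find
        · rw [if_pos hvlt]
          apply ih (mid + 1) right hs (by omega) hr (by omega)
          · intro i hi hilt
            have : xs[i] ≤ xs[mid.toNat]'(by omega) := by
              have : i ≤ mid.toNat := by omega
              exact hmono i mid.toNat (by omega) this
            omega
          · exact hhi
        · rw [if_neg hvlt]
          have hvgt : find < xs[mid.toNat]'(by omega) := by
            rcases lt_trichotomy (xs[mid.toNat]'(by omega)) find with h | h | h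
            · exact absurd h hvlt
            · exact absurd h hveq
            · exact h
          apply ih left (mid - 1) hs hl (by omega) (by omega) hlo
          · intro i hi higt
            have : xs[mid.toNat]'(by omega) ≤ xs[i] := hmono mid.toNat i hi (by omega)
            omega

theorem exist_nums_spec : Claim_equal_exist_nums := by
  unfold Claim_equal_exist_nums
  intro nums finds _
  unfold Spec_exist_nums exist_nums exist_nums_alt
  simp only
  apply List.map_congr_left
  intro find _
  set xs := PySem.List.sorted nums (fun x => x) false with hxs
  have hsorted : xs.Pairwise (· ≤ ·) := by
    simpa using PySem.List.sorted_pairwise nums (fun x => x)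
  rw [bsLoop_correct xs find (xs.length + 1) 0 ((xs.length : Int) - 1) hsorted
    (by omega) (by omega) (by omega)
    (by intro i hi h; omega)
    (by intro i hi h; omega)]
  by_cases hmem : find ∈ xs <;>
    simp [hmem, PySem.Set.mem_ofList]
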